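-- pv_equiv track=rewrite | github.com/lmnogues/adventofcode | 20191216.py | complete_missing_pattern
-- ===== SOURCE A (Python) =====
-- def complete_missing_pattern(pattern, lenght):
--     if len(pattern) >= lenght:
--         return pattern
--     else:
--         final_pattern = list()
--         pos = 0
--         for i in range(lenght):
--             final_pattern.append(pattern[pos])
--             pos += 1
--             if pos > len(pattern)-1:
--                 pos = 0
--         return final_pattern
-- ===== SOURCE B (Python) =====
-- def complete_missing_pattern(pattern, lenght):
--     if len(pattern) >= lenght:
--         return pattern
--     repeats = -(-lenght // len(pattern))
--     return (pattern * repeats)[:lenght]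
-- ===== Notes on version B (the rewrite author's own statement) =====
-- stated objective: idiomatic
-- what changed: Replaces the per-element index-walking loop (append pattern[pos], increment pos, reset at the end) with ceiling-division replication: concatenate the whole pattern ceil(lenght/len(pattern)) times and slice to lenght.
import Mathlib
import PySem

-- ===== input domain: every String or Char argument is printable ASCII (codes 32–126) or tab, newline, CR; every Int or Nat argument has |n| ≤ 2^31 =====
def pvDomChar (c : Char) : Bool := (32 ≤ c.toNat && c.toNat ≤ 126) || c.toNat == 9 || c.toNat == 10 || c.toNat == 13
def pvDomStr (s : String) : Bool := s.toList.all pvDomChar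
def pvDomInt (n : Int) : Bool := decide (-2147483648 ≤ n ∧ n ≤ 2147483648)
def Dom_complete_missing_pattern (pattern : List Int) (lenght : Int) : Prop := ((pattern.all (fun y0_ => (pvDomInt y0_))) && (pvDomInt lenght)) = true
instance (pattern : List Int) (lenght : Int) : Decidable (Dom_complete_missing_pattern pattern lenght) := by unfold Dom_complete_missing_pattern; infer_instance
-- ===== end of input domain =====

-- B replaces A's per-element index-walking fill loop with ceiling-division replication and a slice (idiomatic).


-- ===== PORT A =====
-- the for-loop over range(lenght) with state (final_pattern, pos); pattern[pos] is pyGetD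
-- (always in range under Pre_, since pos is reset to 0 before exceeding len(pattern)-1)
def complete_missing_pattern (pattern : List Int) (lenght : Int) : List Int :=
  if (pattern.length : Int) ≥ lenght then pattern
  else
    ((PySem.List.pyRange 0 lenght 1).foldl
      (fun (st : List Int × Int) _ =>
        let fp := st.1 ++ [PySem.List.pyGetD pattern st.2 0]
        let pos := st.2 + 1
        (fp, if pos > (pattern.length : Int) - 1 then 0 else pos))
      ([], 0)).1

-- ===== PORT B =====
def complete_missing_pattern_alt (pattern : List Int) (lenght : Int) : List Int :=
  if (pattern.length : Int) ≥ lenght then pattern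
  else
    -- repeats = -(-lenght // len(pattern)); Pre_ excludes the empty-pattern case (division by zero)
    let repeats : Int := -(PySem.Int.floordiv (-lenght) (pattern.length : Int))
    PySem.List.slice (PySem.List.pyRepeat pattern repeats) none (some lenght)

-- ===== PRECONDITION & SPEC =====
-- Pre_ excludes exactly pattern = [] with lenght > 0: there A raises IndexError (pattern[0])
-- and B raises ZeroDivisionError (lenght // 0).
def Pre_complete_missing_pattern (pattern : List Int) (lenght : Int) : Prop :=
  pattern = [] → lenght ≤ 0
instance (pattern : List Int) (lenght : Int) : Decidable (Pre_complete_missing_pattern pattern lenght) := by unfold Pre_complete_missing_pattern; infer_instance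

def pvWitness_complete_missing_pattern : List Int × Int := ([1, 2], 5)

def Spec_complete_missing_pattern (pattern : List Int) (lenght : Int) (out : List Int) : Prop := out = complete_missing_pattern_alt pattern lenght
instance (pattern : List Int) (lenght : Int) (out : List Int) : Decidable (Spec_complete_missing_pattern pattern lenght out) := by unfold Spec_complete_missing_pattern; infer_instance

-- ===== CLAIM (what is proved, stated in full; the proofs are below) =====
def Claim_equal_complete_missing_pattern : Prop := ∀ (pattern : List Int) (lenght : Int), Dom_complete_missing_pattern pattern lenght → Pre_complete_missing_pattern pattern lenght → Spec_complete_missing_pattern pattern lenght (complete_missing_pattern pattern lenght)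

-- ===== LEMMAS AND PROOFS =====

-- Python's pattern * r for a nonnegative r is r flattened copies of pattern.
theorem pvRepeat_natCast (xs : List Int) (r : Nat) :
    PySem.List.pyRepeat xs (r : Int) = (List.replicate r xs).flatten := by
  simp [PySem.List.pyRepeat]

-- successor step of the cyclic index
theorem pvSuccMod (n L : Nat) (hL : 0 < L) :
    (n + 1) % L = if n % L + 1 = L then 0 else n % L + 1 := by
  have h1 : (n + 1) % L = (n % L + 1) % L := by
    rw [Nat.add_mod]
    rcases Nat.lt_or_ge 1 L with h | h
    · rw [Nat.mod_eq_of_lt h]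
    · have hL1 : L = 1 := by omega
      subst hL1; simp
  rw [h1]
  split_ifs with h
  · rw [h, Nat.mod_self]
  · exact Nat.mod_eq_of_lt (by have := Nat.mod_lt n hL; omega)

-- A's loop: after n iterations final_pattern holds the first n cyclic elements and pos = n % len
theorem pvFoldA (pattern : List Int) (hL : 0 < pattern.length) (n : Nat) :
    (PySem.List.pyRange 0 (n : Int) 1).foldl
      (fun (st : List Int × Int) _ =>
        let fp := st.1 ++ [PySem.List.pyGetD pattern st.2 0]
        let pos := st.2 + 1
        (fp, if pos > (pattern.length : Int) - 1 then 0 else pos))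
      ([], 0)
    = ((List.range n).map (fun i => pattern.getD (i % pattern.length) 0),
       ((n % pattern.length : Nat) : Int)) := by
  induction n with
  | zero => simp [pysem]
  | succ n ih =>
    rw [show ((n + 1 : Nat) : Int) = (n : Int) + 1 by push_cast; ring,
        PySem.List.pyRange_one_succ_right (by omega), List.foldl_append, ih]
    simp only [List.foldl_cons, List.foldl_nil, List.range_succ, List.map_append, List.map_cons,
      List.map_nil, PySem.List.pyGetD_natCast, List.getD]
    refine Prod.ext (by simp) ?_
    simp only
    rw [pvSuccMod n pattern.length hL]
    have hlt := Nat.mod_lt n hL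
    split_ifs with h h2 h2 <;> push_cast <;> omega

-- indexing into flattened replicated copies is cyclic indexing
theorem pvGetFlat (pattern : List Int) (r i : Nat)
    (h : i < ((List.replicate r pattern).flatten).length) :
    ((List.replicate r pattern).flatten)[i] = pattern.getD (i % pattern.length) 0 := by
  induction r generalizing i with
  | zero => simp at h
  | succ r ih =>
    have hsp : (List.replicate (r + 1) pattern).flatten
        = pattern ++ (List.replicate r pattern).flatten := by
      rw [List.replicate_succ, List.flatten_cons]
    rcases Nat.lt_or_ge i pattern.length with hi | hi
    · simp only [hsp] at h ⊢
      rw [List.getElem_append_left hi, Nat.mod_eq_of_lt hi, List.getD_eq_getElem _ _ hi]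
    · simp only [hsp] at h ⊢
      rw [List.getElem_append_right hi]
      have h' : i - pattern.length < ((List.replicate r pattern).flatten).length := by
        simp only [List.length_append] at h; omega
      rw [ih _ h']
      congr 1
      conv_rhs => rw [show i = (i - pattern.length) + pattern.length by omega]
      rw [Nat.add_mod_right]

-- ===== VERDICT (by name: the statement is the Claim_ definition above) =====
theorem complete_missing_pattern_spec : Claim_equal_complete_missing_pattern := by
  intro pattern lenght _ hpre
  unfold Spec_complete_missing_pattern complete_missing_pattern complete_missing_pattern_alt
  by_cases h : (pattern.length : Int) ≥ lenght
  · simp [h]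
  · simp only [if_neg h]
    have hlt : (pattern.length : Int) < lenght := lt_of_not_ge h
    have hl0 : 0 < lenght := lt_of_le_of_lt (Int.natCast_nonneg _) hlt
    have hp : pattern ≠ [] := fun he => absurd (hpre he) (by omega)
    have hL : 0 < pattern.length := List.length_pos_of_ne_nil hp
    have hLpos : (0 : Int) < (pattern.length : Int) := by exact_mod_cast hL
    obtain ⟨n, rfl⟩ : ∃ n : Nat, lenght = (n : Int) := ⟨lenght.toNat, (Int.toNat_of_nonneg hl0.le).symm⟩
    rw [pvFoldA pattern hL n]
    -- B side: bounds on the ceiling division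
    have hq := (PySem.Int.neg_floordiv_neg_eq_iff_of_pos (a := (n : Int))
      (b := (pattern.length : Int))
      (q := -(PySem.Int.floordiv (-(n : Int)) (pattern.length : Int))) hLpos).mp rfl
    have hq0 : 0 < -(PySem.Int.floordiv (-(n : Int)) (pattern.length : Int)) := by
      nlinarith [hq.1, hq.2, hl0, hLpos]
    obtain ⟨r, hr⟩ : ∃ r : Nat, -(PySem.Int.floordiv (-(n : Int)) (pattern.length : Int)) = (r : Int) :=
      ⟨_, (Int.toNat_of_nonneg hq0.le).symm⟩
    rw [hr] at hq
    have hnr : n ≤ r * pattern.length := by exact_mod_cast hq.2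
    rw [hr]
    rw [pvRepeat_natCast, PySem.List.slice_to_natCast]
    have hflen : ((List.replicate r pattern).flatten).length = r * pattern.length := by
      simp [List.length_flatten, List.map_replicate, List.sum_replicate]
    apply List.ext_getElem
    · simp [hflen]; omega
    · intro i h1 h2
      have h1' : i < n := by simpa using h1
      simp only [List.getElem_map, List.getElem_range, List.getElem_take]
      exact (pvGetFlat pattern r i (by omega)).symm
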